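-- pv_equiv track=rewrite | github.com/Schematise-Lex-Data-Analysis/akoma-markup | src/akoma_markup/markdown_table.py | merge_continuation_tables
-- ===== SOURCE A (Python) =====
-- from typing import TypedDict
--
-- class ParsedTable(TypedDict):
--     headers: list[str]
--     rows: list[list[str]]
--
-- def merge_continuation_tables(tables: list[ParsedTable]) -> list[ParsedTable]:
--     """Merge adjacent tables with structurally identical headers.
--     """
--     if not tables:
--         return []
--     merged: list[ParsedTable] = [
--         {"headers": list(tables[0]["headers"]), "rows": list(tables[0]["rows"])}
--     ]
--     for t in tables[1:]:
--         if t["headers"] == merged[-1]["headers"] and t["headers"]: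
--             merged[-1]["rows"].extend(t["rows"])
--         else:
--             merged.append(
--                 {"headers": list(t["headers"]), "rows": list(t["rows"])}
--             )
--     return merged
-- ===== SOURCE B (Python) =====
-- def merge_continuation_tables(tables):
--     """Build the result back-to-front: fold over the reversed input, prepending each
--     table into the first group of the result when its nonempty headers match."""
--     out = []
--     for t in reversed(tables):
--         h = t["headers"]
--         if out and h and out[0]["headers"] == h:
--             out = [{"headers": list(h), "rows": list(t["rows"]) + out[0]["rows"]}] + out[1:]
--         else:
--             out = [{"headers": list(h), "rows": list(t["rows"])}] + out
--     return out
-- ===== Notes on version B (the rewrite author's own statement) =====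
-- stated objective: alternative
-- what changed: A scans left-to-right extending the rows of the last emitted group; B builds the output back-to-front with a right fold, prepending each table's rows into the FIRST group of the partial result when its nonempty headers match - correctness rests on run-merging being direction-independent.
import Mathlib
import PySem

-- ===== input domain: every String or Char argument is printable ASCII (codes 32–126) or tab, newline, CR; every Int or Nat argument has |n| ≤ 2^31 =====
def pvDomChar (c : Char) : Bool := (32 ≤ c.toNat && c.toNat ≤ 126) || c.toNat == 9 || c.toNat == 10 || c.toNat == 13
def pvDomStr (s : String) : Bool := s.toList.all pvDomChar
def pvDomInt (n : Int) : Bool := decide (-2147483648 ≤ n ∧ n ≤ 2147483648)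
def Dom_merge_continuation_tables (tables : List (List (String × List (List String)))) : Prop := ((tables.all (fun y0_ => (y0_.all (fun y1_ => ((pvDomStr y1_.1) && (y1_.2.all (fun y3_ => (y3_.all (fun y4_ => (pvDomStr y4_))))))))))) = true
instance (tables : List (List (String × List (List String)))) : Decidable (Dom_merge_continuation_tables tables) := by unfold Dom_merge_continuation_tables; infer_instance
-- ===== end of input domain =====

-- B builds the output back-to-front with a right fold (prepending into the first group);
-- A scans left-to-right extending the last group. Same results since run-merging is
-- direction-independent; proof relates A's loop state to B's fold.


-- shared helpers: Python dict lookup t[k] (default [] only reachable outside Pre_),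
-- and construction of the output dict {"headers": h, "rows": r}
def pvGet (t : List (String × List (List String))) (k : String) : List (List String) :=
  ((PySem.Dict.ofList t).get? k).getD []

def pvMk (h r : List (List String)) : List (String × List (List String)) :=
  [("headers", h), ("rows", r)]

-- ===== PORT A =====
-- the 'for t in tables[1:]' loop of A: state = (merged list minus its last element,
-- reversed) × the headers and rows of merged[-1]
def pvLoopA (ts : List (List (String × List (List String))))
    (done : List (List (String × List (List String))))
    (h r : List (List String)) : List (List (String × List (List String))) :=
  match ts with
  | [] => ((pvMk h r) :: done).reverse
  | u :: us =>
    if pvGet u "headers" = h ∧ h ≠ [] then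
      pvLoopA us done h (r ++ pvGet u "rows")
    else
      pvLoopA us (pvMk h r :: done) (pvGet u "headers") (pvGet u "rows")

def merge_continuation_tables (tables : List (List (String × List (List String)))) : List (List (String × List (List String))) :=
  match tables with
  | [] => []
  | t :: rest => pvLoopA rest [] (pvGet t "headers") (pvGet t "rows")

-- ===== PORT B =====
-- one step of Source B's loop over reversed(tables): prepend t into the partial result
def pvStepB (t : List (String × List (List String)))
    (out : List (List (String × List (List String)))) : List (List (String × List (List String))) :=
  let h := pvGet t "headers"
  match out with
  | a :: rest =>
    if h ≠ [] ∧ pvGet a "headers" = h then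
      pvMk h (pvGet t "rows" ++ pvGet a "rows") :: rest
    else
      pvMk h (pvGet t "rows") :: a :: rest
  | [] => [pvMk h (pvGet t "rows")]

def merge_continuation_tables_alt (tables : List (List (String × List (List String)))) : List (List (String × List (List String))) :=
  tables.foldr pvStepB []

-- ===== PRECONDITION & SPEC =====
-- Pre_ excludes exactly the inputs where Python A raises KeyError: some table lacking
-- a "headers" or "rows" key (B raises there too).
def Pre_merge_continuation_tables (tables : List (List (String × List (List String)))) : Prop :=
  (tables.all (fun t => (t.map (·.1)).contains "headers" && (t.map (·.1)).contains "rows")) = true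
instance (tables : List (List (String × List (List String)))) : Decidable (Pre_merge_continuation_tables tables) := by unfold Pre_merge_continuation_tables; infer_instance

def pvWitness_merge_continuation_tables : (List (List (String × List (List String)))) :=
  [[("headers", [["a"]]), ("rows", [["1"], ["2"]])],
   [("headers", [["a"]]), ("rows", [["3"]])],
   [("headers", []), ("rows", [["4"]])]]

def Spec_merge_continuation_tables (tables : List (List (String × List (List String)))) (out : List (List (String × List (List String)))) : Prop := out = merge_continuation_tables_alt tables
instance (tables : List (List (String × List (List String)))) (out : List (List (String × List (List String)))) : Decidable (Spec_merge_continuation_tables tables out) := by unfold Spec_merge_continuation_tables; infer_instance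

-- ===== CLAIM =====
def Claim_equal_merge_continuation_tables : Prop := ∀ (tables : List (List (String × List (List String)))), Dom_merge_continuation_tables tables → Pre_merge_continuation_tables tables → Spec_merge_continuation_tables tables (merge_continuation_tables tables)

-- ===== LEMMAS AND PROOFS =====

-- pvStepB with the headers/rows of t abstracted out
def pvStepHR (h r : List (List String))
    (out : List (List (String × List (List String)))) : List (List (String × List (List String))) :=
  match out with
  | a :: rest =>
    if h ≠ [] ∧ pvGet a "headers" = h then
      pvMk h (r ++ pvGet a "rows") :: rest
    else
      pvMk h r :: a :: rest
  | [] => [pvMk h r]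

theorem stepB_eq (t : List (String × List (List String)))
    (out : List (List (String × List (List String)))) :
    pvStepB t out = pvStepHR (pvGet t "headers") (pvGet t "rows") out := rfl

@[simp] theorem pvGet_mk_headers (h r : List (List String)) :
    pvGet (pvMk h r) "headers" = h := by
  simp [pvGet, pvMk, PySem.Dict.ofList, PySem.Dict.update, PySem.Dict.get?_insert]

@[simp] theorem pvGet_mk_rows (h r : List (List String)) :
    pvGet (pvMk h r) "rows" = r := by
  simp [pvGet, pvMk, PySem.Dict.ofList, PySem.Dict.update]

-- merging twice into the same nonempty-headers group = merging the concatenation once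
theorem stepHR_stepHR (h r r' : List (List String)) (hh : h ≠ [])
    (out : List (List (String × List (List String)))) :
    pvStepHR h r (pvStepHR h r' out) = pvStepHR h (r ++ r') out := by
  cases out with
  | nil => simp [pvStepHR, hh]
  | cons a rest =>
    by_cases he : pvGet a "headers" = h
    · simp [pvStepHR, hh, he]
    · simp [pvStepHR, hh, he]

-- a step with different-or-empty headers just prepends a fresh group
theorem stepHR_prepend (h r h' r' : List (List String))
    (hne : ¬ (h' = h ∧ h ≠ []))
    (out : List (List (String × List (List String)))) :
    pvStepHR h r (pvStepHR h' r' out) = pvMk h r :: pvStepHR h' r' out := by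
  cases out with
  | nil =>
    simp only [pvStepHR, pvGet_mk_headers]
    by_cases hh : h = []
    · simp [hh]
    · have : h' ≠ h := fun e => hne ⟨e, hh⟩
      simp [hh, this]
  | cons a rest =>
    by_cases hc : h' ≠ [] ∧ pvGet a "headers" = h'
    · simp only [pvStepHR, if_pos hc, pvGet_mk_headers]
      by_cases hh : h = []
      · simp [hh]
      · have : h' ≠ h := fun e => hne ⟨e, hh⟩
        simp [hh, this]
    · simp only [pvStepHR, if_neg hc, pvGet_mk_headers]
      by_cases hh : h = []
      · simp [hh]
      · have : h' ≠ h := fun e => hne ⟨e, hh⟩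
        simp [hh, this]

-- A's loop equals B's fold, modulo the finished groups in 'done'
theorem loopA_eq_fold (ts : List (List (String × List (List String))))
    (done : List (List (String × List (List String))))
    (h r : List (List String)) :
    pvLoopA ts done h r = done.reverse ++ pvStepHR h r (ts.foldr pvStepB []) := by
  induction ts generalizing done h r with
  | nil => simp [pvLoopA, pvStepHR]
  | cons u us ih =>
    rw [pvLoopA]
    by_cases hc : pvGet u "headers" = h ∧ h ≠ []
    · rw [if_pos hc, ih]
      rw [List.foldr_cons, stepB_eq, hc.1, stepHR_stepHR h r (pvGet u "rows") hc.2]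
    · rw [if_neg hc, ih]
      rw [List.foldr_cons, stepB_eq,
        stepHR_prepend h r (pvGet u "headers") (pvGet u "rows") hc]
      simp

-- ===== VERDICT =====
theorem merge_continuation_tables_spec : Claim_equal_merge_continuation_tables := by
  intro tables _ _
  unfold Spec_merge_continuation_tables
  match tables with
  | [] => rfl
  | t :: rest =>
    rw [merge_continuation_tables, loopA_eq_fold]
    rw [merge_continuation_tables_alt, List.foldr_cons, stepB_eq]
    simp
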